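-- pv_equiv track=rewrite | github.com/lucasvtiradentes/md-align | src/docalign/checks/box_padding.py | _expected_padding
-- ===== SOURCE A (Python) =====
-- from collections import Counter
--
-- def _expected_padding(paddings):
--     counts = Counter(paddings)
--     max_count = max(counts.values())
--     candidates = [p for p, c in counts.items() if c == max_count]
--     if len(candidates) == 1:
--         return candidates[0]
--     if 0 in candidates:
--         non_zero = [c for c in candidates if c > 0]
--         return min(non_zero)
--     return None
-- ===== SOURCE B (Python) =====
-- def _expected_padding(paddings):
--     s = sorted(paddings)
--     n = len(s)
--     max_count = 0
--     candidates = []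
--     i = 0
--     while i < n:
--         j = i
--         while j < n and s[j] == s[i]:
--             j += 1
--         c = j - i
--         if c > max_count:
--             max_count = c
--             candidates = [s[i]]
--         elif c == max_count:
--             candidates.append(s[i])
--         i = j
--     if len(candidates) == 1:
--         return candidates[0]
--     if 0 in candidates:
--         return min(c for c in candidates if c > 0)
--     return None
-- ===== Notes on version B (the rewrite author's own statement) =====
-- stated objective: alternative
-- what changed: Replaced the Counter hash-count and dict-items scan with sorting a copy and a single grouped pass over equal runs that tracks the maximal run length and its values; the tie-break logic is kept.
-- outside the precondition, e.g. on _expected_padding([]): A raises ValueError, B returns None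
import Mathlib
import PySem

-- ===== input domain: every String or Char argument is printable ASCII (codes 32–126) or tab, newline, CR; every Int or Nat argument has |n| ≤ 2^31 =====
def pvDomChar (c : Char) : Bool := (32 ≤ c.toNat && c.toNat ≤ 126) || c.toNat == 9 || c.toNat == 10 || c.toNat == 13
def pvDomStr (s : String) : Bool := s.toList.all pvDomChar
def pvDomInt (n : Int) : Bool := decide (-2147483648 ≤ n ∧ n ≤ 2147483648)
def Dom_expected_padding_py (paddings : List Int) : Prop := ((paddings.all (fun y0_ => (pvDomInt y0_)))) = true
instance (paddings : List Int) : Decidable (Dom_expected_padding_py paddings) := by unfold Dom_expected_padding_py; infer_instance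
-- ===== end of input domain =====

-- B replaces A's Counter hash-count with sort + one grouped pass over equal runs (same cost class, different data structure); same tie-break.


-- ===== PORT A =====
def expected_padding_py (paddings : List Int) : Option Int :=
  let counts := PySem.Dict.counter paddings             -- counts = Counter(paddings)
  match PySem.List.max? counts.values (fun v => v) with -- max_count = max(counts.values()); none = ValueError, excluded by Pre_
  | none => none
  | some max_count =>
    let candidates := (counts.items.filter (fun pc => pc.2 == max_count)).map Prod.fst
    if candidates.length = 1 then candidates.head?      -- candidates[0] of a singleton list
    else if candidates.contains 0 then
      PySem.List.min? (candidates.filter (fun c => 0 < c)) (fun v => v)  -- none = ValueError on min([]), excluded by Pre_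
    else none

-- ===== PORT B =====
-- the while-loop of Source B: each step consumes one run of equal values (c = run length);
-- fuel = the list length only makes the recursion structural, it never runs out
def scanRuns : Nat → List Int → Nat → List Int → Nat × List Int
  | 0, _, max_count, candidates => (max_count, candidates)
  | _ + 1, [], max_count, candidates => (max_count, candidates)
  | fuel + 1, x :: rest, max_count, candidates =>
      let c := (rest.takeWhile (fun y => y == x)).length + 1
      let rest' := rest.dropWhile (fun y => y == x)
      if c > max_count then scanRuns fuel rest' c [x]
      else if c = max_count then scanRuns fuel rest' max_count (candidates ++ [x])
      else scanRuns fuel rest' max_count candidates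

def expected_padding_py_alt (paddings : List Int) : Option Int :=
  let s := PySem.List.sorted paddings (fun x => x) false
  let candidates := (scanRuns s.length s 0 []).2
  if candidates.length = 1 then candidates.head?
  else if candidates.contains 0 then
    PySem.List.min? (candidates.filter (fun c => 0 < c)) (fun v => v)  -- none = ValueError on empty generator, excluded by Pre_
  else none

-- ===== PRECONDITION & SPEC =====
-- Pre_ excludes exactly the inputs where the Python A raises ValueError: the empty list (max of an
-- empty sequence), and the tie case where 0 has maximal multiplicity, some other value ties it, and
-- no positive value does (min of an empty list); B raises there too except on [].
def Pre_expected_padding_py (paddings : List Int) : Prop :=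
  paddings ≠ [] ∧
  ¬ ((∀ v ∈ paddings, paddings.count v ≤ paddings.count 0) ∧
     (∃ v ∈ paddings, v ≠ 0 ∧ paddings.count v = paddings.count 0) ∧
     (∀ v ∈ paddings, 0 < v → paddings.count v < paddings.count 0))
instance (paddings : List Int) : Decidable (Pre_expected_padding_py paddings) := by
  unfold Pre_expected_padding_py; infer_instance

def pvWitness_expected_padding_py : List Int := [4, 4, 2]

def Spec_expected_padding_py (paddings : List Int) (out : Option Int) : Prop := out = expected_padding_py_alt paddings
instance (paddings : List Int) (out : Option Int) : Decidable (Spec_expected_padding_py paddings out) := by unfold Spec_expected_padding_py; infer_instance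

-- ===== CLAIM (what is proved, stated in full; the proofs are below) =====
def Claim_equal_expected_padding_py : Prop := ∀ (paddings : List Int), Dom_expected_padding_py paddings → Pre_expected_padding_py paddings → Spec_expected_padding_py paddings (expected_padding_py paddings)

-- ===== LEMMAS AND PROOFS =====

-- In a ≤-sorted list whose elements are all ≥ x, the x's form a prefix:
-- the run taken by takeWhile has length count x, and dropWhile removes exactly the x's.
theorem run_head_split (x : Int) : ∀ (l : List Int), l.Pairwise (· ≤ ·) → (∀ u ∈ l, x ≤ u) →
    (l.takeWhile (fun y => y == x)).length = l.count x ∧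
    l.dropWhile (fun y => y == x) = l.filter (fun y => !(y == x)) := by
  intro l
  induction l with
  | nil => simp
  | cons y t ih =>
    intro hp hge
    by_cases hyx : y = x
    · subst hyx
      have := ih hp.of_cons (fun u hu => hge u (List.mem_cons_of_mem _ hu))
      simp [List.takeWhile, List.dropWhile, this.1, this.2]
    · have hxy : x < y := lt_of_le_of_ne (hge y (List.mem_cons_self)) (Ne.symm hyx)
      have hb : (y == x) = false := by simp [hyx]
      have hxnot : x ∉ y :: t := by
        intro hmem
        rcases List.mem_cons.mp hmem with h | h
        · exact hyx h.symm
        · exact absurd (List.rel_of_pairwise_cons hp h) (not_le.mpr hxy)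
      constructor
      · simp [List.takeWhile, hb, List.count_eq_zero.mpr hxnot]
      · have : ∀ u ∈ y :: t, (!(u == x)) = true := by
          intro u hu
          simp only [Bool.not_eq_eq_eq_not, Bool.not_true, beq_eq_false_iff_ne]
          intro h; exact hxnot (h ▸ hu)
        simp [List.dropWhile, hb, List.filter_eq_self.mpr this]

-- invariant of Source B's grouped scan over a sorted list
theorem scanRuns_spec : ∀ (fuel : Nat) (s : List Int) (mc : Nat) (best : List Int),
    s.length ≤ fuel → s.Pairwise (· ≤ ·) → best.Nodup → (∀ v ∈ best, ∀ u ∈ s, v < u) →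
    (scanRuns fuel s mc best).2.Nodup ∧
    mc ≤ (scanRuns fuel s mc best).1 ∧
    (∀ v ∈ s, s.count v ≤ (scanRuns fuel s mc best).1) ∧
    ((scanRuns fuel s mc best).1 = mc ∨ ∃ v ∈ s, s.count v = (scanRuns fuel s mc best).1) ∧
    (∀ v, v ∈ (scanRuns fuel s mc best).2 ↔
      (((scanRuns fuel s mc best).1 = mc ∧ v ∈ best) ∨ (v ∈ s ∧ s.count v = (scanRuns fuel s mc best).1))) := by
  intro fuel
  induction fuel with
  | zero =>
    intro s mc best hlen _ hnd _
    have hs : s = [] := List.eq_nil_of_length_eq_zero (Nat.le_zero.mp hlen)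
    subst hs
    refine ⟨hnd, le_refl _, by simp, Or.inl rfl, by simp [scanRuns]⟩
  | succ fuel ih =>
    intro s mc best hlen hp hnd hlt
    cases s with
    | nil => exact ⟨hnd, le_refl _, by simp, Or.inl rfl, by simp [scanRuns]⟩
    | cons x rest =>
      have hall : ∀ u ∈ rest, x ≤ u := fun u hu => List.rel_of_pairwise_cons hp hu
      obtain ⟨htw, hdw⟩ := run_head_split x rest hp.of_cons hall
      set c := (rest.takeWhile (fun y => y == x)).length + 1 with hcdef
      set rest' := rest.dropWhile (fun y => y == x) with hrdef
      have hc : c = (x :: rest).count x := by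
        simp [hcdef, htw]
      have hmr : ∀ v, v ∈ rest' ↔ v ∈ rest ∧ v ≠ x := by
        intro v; rw [hdw]; simp [List.mem_filter]
      have hxnot : x ∉ rest' := by simp [hmr]
      have hps : rest'.Pairwise (· ≤ ·) := by rw [hdw]; exact hp.of_cons.filter _
      have hgt : ∀ u ∈ rest', x < u := by
        intro u hu
        obtain ⟨hu1, hu2⟩ := (hmr u).mp hu
        exact lt_of_le_of_ne (hall u hu1) (Ne.symm hu2)
      have hlen' : rest'.length ≤ fuel := by
        have h1 : rest'.length ≤ rest.length := by rw [hdw]; exact List.length_filter_le _ _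
        have h2 : rest.length ≤ fuel := by simpa using hlen
        omega
      have hcnt : ∀ v, v ≠ x → (x :: rest).count v = rest'.count v := by
        intro v hv
        rw [hdw, List.count_filter (by simp [hv])]
        simp [List.count_cons]
        exact fun he => hv he.symm
      have hmem : ∀ v, v ≠ x → (v ∈ (x :: rest) ↔ v ∈ rest') := by
        intro v hv
        rw [hmr]
        simp [List.mem_cons, hv]
      have hunf : scanRuns (fuel + 1) (x :: rest) mc best =
          if c > mc then scanRuns fuel rest' c [x]
          else if c = mc then scanRuns fuel rest' mc (best ++ [x])
          else scanRuns fuel rest' mc best := rfl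
      by_cases h1 : c > mc
      · rw [hunf, if_pos h1]
        obtain ⟨i1, i2, i3, i4, i5⟩ := ih rest' c [x] hlen' hps (List.nodup_singleton x)
          (by intro v hv u hu; simp at hv; subst hv; exact hgt u hu)
        refine ⟨i1, by omega, ?_, ?_, ?_⟩
        · intro v hv
          by_cases hvx : v = x
          · subst hvx; rw [← hc]; exact le_trans (le_of_eq rfl) i2
          · rw [hcnt v hvx]
            exact i3 v ((hmem v hvx).mp hv)
        · rcases i4 with h | ⟨v, hv, hcv⟩
          · exact Or.inr ⟨x, List.mem_cons_self, by rw [← hc, h]⟩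
          · have hvx : v ≠ x := fun he => hxnot (he ▸ hv)
            exact Or.inr ⟨v, (hmem v hvx).mpr hv, by rw [hcnt v hvx]; exact hcv⟩
        · intro v
          rw [i5 v]
          constructor
          · rintro (⟨hM, hv⟩ | ⟨hv, hcv⟩)
            · simp at hv; subst hv
              exact Or.inr ⟨List.mem_cons_self, by rw [← hc, hM]⟩
            · have hvx : v ≠ x := fun he => hxnot (he ▸ hv)
              exact Or.inr ⟨(hmem v hvx).mpr hv, by rw [hcnt v hvx]; exact hcv⟩
          · rintro (⟨hM, _⟩ | ⟨hv, hcv⟩)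
            · omega
            · by_cases hvx : v = x
              · subst hvx
                rw [← hc] at hcv
                exact Or.inl ⟨hcv.symm, List.mem_singleton.mpr rfl⟩
              · exact Or.inr ⟨(hmem v hvx).mp hv, by rw [← hcnt v hvx]; exact hcv⟩
      · by_cases h2 : c = mc
        · rw [hunf, if_neg h1, if_pos h2]
          have hxb : x ∉ best := fun hx => absurd (hlt x hx x List.mem_cons_self) (lt_irrefl x)
          obtain ⟨i1, i2, i3, i4, i5⟩ := ih rest' mc (best ++ [x]) hlen' hps
            (by simp [List.nodup_append, hnd]; exact fun a ha he => hxb (he ▸ ha))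
            (by
              intro v hv u hu
              rcases List.mem_append.mp hv with hv | hv
              · exact hlt v hv u (List.mem_cons_of_mem _ ((hmr u).mp hu).1)
              · simp at hv; subst hv; exact hgt u hu)
          refine ⟨i1, i2, ?_, ?_, ?_⟩
          · intro v hv
            by_cases hvx : v = x
            · subst hvx; rw [← hc, h2]; exact i2
            · rw [hcnt v hvx]; exact i3 v ((hmem v hvx).mp hv)
          · rcases i4 with h | ⟨v, hv, hcv⟩
            · exact Or.inl h
            · have hvx : v ≠ x := fun he => hxnot (he ▸ hv)
              exact Or.inr ⟨v, (hmem v hvx).mpr hv, by rw [hcnt v hvx]; exact hcv⟩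
          · intro v
            rw [i5 v]
            constructor
            · rintro (⟨hM, hv⟩ | ⟨hv, hcv⟩)
              · rcases List.mem_append.mp hv with hv | hv
                · exact Or.inl ⟨hM, hv⟩
                · simp at hv; subst hv
                  exact Or.inr ⟨List.mem_cons_self, by rw [← hc, h2, hM]⟩
              · have hvx : v ≠ x := fun he => hxnot (he ▸ hv)
                exact Or.inr ⟨(hmem v hvx).mpr hv, by rw [hcnt v hvx]; exact hcv⟩
            · rintro (⟨hM, hv⟩ | ⟨hv, hcv⟩)
              · exact Or.inl ⟨hM, List.mem_append.mpr (Or.inl hv)⟩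
              · by_cases hvx : v = x
                · subst hvx
                  rw [← hc] at hcv
                  exact Or.inl ⟨by omega, List.mem_append.mpr (Or.inr (List.mem_singleton.mpr rfl))⟩
                · exact Or.inr ⟨(hmem v hvx).mp hv, by rw [← hcnt v hvx]; exact hcv⟩
        · rw [hunf, if_neg h1, if_neg h2]
          obtain ⟨i1, i2, i3, i4, i5⟩ := ih rest' mc best hlen' hps hnd
            (fun v hv u hu => hlt v hv u (List.mem_cons_of_mem _ ((hmr u).mp hu).1))
          refine ⟨i1, i2, ?_, ?_, ?_⟩
          · intro v hv
            by_cases hvx : v = x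
            · subst hvx; rw [← hc]; omega
            · rw [hcnt v hvx]; exact i3 v ((hmem v hvx).mp hv)
          · rcases i4 with h | ⟨v, hv, hcv⟩
            · exact Or.inl h
            · have hvx : v ≠ x := fun he => hxnot (he ▸ hv)
              exact Or.inr ⟨v, (hmem v hvx).mpr hv, by rw [hcnt v hvx]; exact hcv⟩
          · intro v
            rw [i5 v]
            constructor
            · rintro (⟨hM, hv⟩ | ⟨hv, hcv⟩)
              · exact Or.inl ⟨hM, hv⟩
              · have hvx : v ≠ x := fun he => hxnot (he ▸ hv)
                exact Or.inr ⟨(hmem v hvx).mpr hv, by rw [hcnt v hvx]; exact hcv⟩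
            · rintro (⟨hM, hv⟩ | ⟨hv, hcv⟩)
              · exact Or.inl ⟨hM, hv⟩
              · by_cases hvx : v = x
                · subst hvx
                  rw [← hc] at hcv
                  omega
                · exact Or.inr ⟨(hmem v hvx).mp hv, by rw [← hcnt v hvx]; exact hcv⟩

-- first minimal element of an Int list (key = identity) depends only on the set of members
theorem min?_id_congr (l1 l2 : List Int) (h : ∀ v, v ∈ l1 ↔ v ∈ l2) :
    PySem.List.min? l1 (fun v => v) = PySem.List.min? l2 (fun v => v) := by
  cases h1 : PySem.List.min? l1 (fun v => v) with
  | none =>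
    cases h2 : PySem.List.min? l2 (fun v => v) with
    | none => rfl
    | some m2 =>
      have := PySem.List.min?_mem h2
      rw [PySem.List.min?_eq_none_iff] at h1
      exact absurd ((h m2).mpr this) (by simp [h1])
  | some m1 =>
    cases h2 : PySem.List.min? l2 (fun v => v) with
    | none =>
      have := PySem.List.min?_mem h1
      rw [PySem.List.min?_eq_none_iff] at h2
      exact absurd ((h m1).mp this) (by simp [h2])
    | some m2 =>
      have hm1 := PySem.List.min?_mem h1
      have hm2 := PySem.List.min?_mem h2
      have h12 : m1 ≤ m2 := PySem.List.min?_isMin h1 m2 ((h m2).mpr hm2)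
      have h21 : m2 ≤ m1 := PySem.List.min?_isMin h2 m1 ((h m1).mp hm1)
      rw [le_antisymm h12 h21]

-- ===== VERDICT (by name: the statement is the Claim_ definition above) =====
theorem expected_padding_py_spec : Claim_equal_expected_padding_py := by
  intro xs _ hpre
  obtain ⟨hne, -⟩ := hpre
  unfold Spec_expected_padding_py expected_padding_py expected_padding_py_alt
  have hperm : (PySem.List.sorted xs (fun x => x) false).Perm xs := PySem.List.sorted_perm xs _ false
  set s := PySem.List.sorted xs (fun x => x) false with hsdef
  have hcnt : ∀ v, s.count v = xs.count v := fun v => hperm.count_eq v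
  have hmem : ∀ v, v ∈ s ↔ v ∈ xs := fun v => hperm.mem_iff
  have hsp : s.Pairwise (· ≤ ·) := PySem.List.sorted_pairwise xs (fun x => x)
  have hsne : s ≠ [] := by rw [hsdef, Ne, PySem.List.sorted_eq_nil_iff]; exact hne
  obtain ⟨bnd, -, bcnt, bach, bmem⟩ :=
    scanRuns_spec s.length s 0 [] (le_refl _) hsp List.nodup_nil (by simp)
  set M := (scanRuns s.length s 0 []).1 with hMdef
  set B := (scanRuns s.length s 0 []).2 with hBdef
  have hMpos : M ≠ 0 := by
    obtain ⟨u, hu⟩ := List.exists_mem_of_ne_nil s hsne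
    have h1 : 1 ≤ s.count u := List.one_le_count_iff.mpr hu
    have h2 := bcnt u hu
    omega
  have bmem' : ∀ v, v ∈ B ↔ v ∈ xs ∧ xs.count v = M := by
    intro v
    rw [bmem v]
    simp only [List.not_mem_nil, and_false, false_or]
    rw [hmem v, hcnt v]
  have bach' : ∃ w ∈ xs, xs.count w = M := by
    rcases bach with h | ⟨w, hw, hcw⟩
    · exact absurd h hMpos
    · exact ⟨w, (hmem w).mp hw, by rw [← hcnt w]; exact hcw⟩
  have hvals : (PySem.Dict.counter xs).values =
      (PySem.Set.ofList xs).map (fun k => ((xs.count k : Int))) := by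
    simp only [PySem.Dict.values, PySem.Dict.items_counter, List.map_map]
    rfl
  obtain ⟨mcA, hmax⟩ : ∃ m, PySem.List.max? (PySem.Dict.counter xs).values (fun v => v) = some m := by
    cases h : PySem.List.max? (PySem.Dict.counter xs).values (fun v => v) with
    | none =>
      rw [PySem.List.max?_eq_none_iff, hvals, List.map_eq_nil_iff] at h
      obtain ⟨u, hu⟩ := List.exists_mem_of_ne_nil xs hne
      exact absurd ((PySem.Set.mem_ofList xs u).mpr hu) (by simp [h])
    | some m => exact ⟨m, rfl⟩
  dsimp only
  rw [hmax]
  dsimp only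
  have hmcA_max : ∀ v ∈ xs, (xs.count v : Int) ≤ mcA := by
    intro v hv
    exact PySem.List.max?_isMax hmax _
      (by rw [hvals]; exact List.mem_map.mpr ⟨v, (PySem.Set.mem_ofList xs v).mpr hv, rfl⟩)
  have hMA : mcA = (M : Int) := by
    have h1 : mcA ≤ (M : Int) := by
      have := PySem.List.max?_mem hmax
      rw [hvals] at this
      obtain ⟨k, hk, hke⟩ := List.mem_map.mp this
      have hkx : k ∈ xs := (PySem.Set.mem_ofList xs k).mp hk
      have : xs.count k ≤ M := by rw [← hcnt k]; exact bcnt k ((hmem k).mpr hkx)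
      omega
    have h2 : (M : Int) ≤ mcA := by
      obtain ⟨w, hw, hcw⟩ := bach'
      have := hmcA_max w hw
      omega
    omega
  have hCA : ((PySem.Dict.counter xs).items.filter (fun pc => pc.2 == mcA)).map Prod.fst =
      (PySem.Set.ofList xs).filter (fun k => ((xs.count k : Int) == mcA)) := by
    rw [PySem.Dict.items_counter, List.filter_map, List.map_map]
    simp [Function.comp_def]
  rw [hCA]
  set CA := (PySem.Set.ofList xs).filter (fun k => ((xs.count k : Int) == mcA)) with hCAdef
  have hCAmem : ∀ v, v ∈ CA ↔ v ∈ xs ∧ xs.count v = M := by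
    intro v
    rw [hCAdef, List.mem_filter, PySem.Set.mem_ofList, beq_iff_eq, hMA]
    simp
  have hCAnd : CA.Nodup := List.Nodup.filter _ (PySem.Set.nodup_ofList xs)
  have hsame : ∀ v, v ∈ CA ↔ v ∈ B := fun v => (hCAmem v).trans (bmem' v).symm
  have hperm2 : CA.Perm B := (List.perm_ext_iff_of_nodup hCAnd bnd).mpr hsame
  have hlen2 : CA.length = B.length := hperm2.length_eq
  by_cases hl : B.length = 1
  · rw [if_pos (hlen2 ▸ hl), if_pos hl]
    obtain ⟨a, ha⟩ := List.length_eq_one_iff.mp (hlen2 ▸ hl)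
    obtain ⟨b, hb⟩ := List.length_eq_one_iff.mp hl
    have hab : a = b := by
      have := (hsame a).mp (by simp [ha])
      rw [hb] at this
      simpa using this
    rw [show (scanRuns (PySem.List.sorted xs (fun x => x) false).length (PySem.List.sorted xs (fun x => x) false) 0 []).2 = [b] from hb, ha, hab]
  · rw [if_neg (by rw [hlen2]; exact hl), if_neg hl]
    have hcont : CA.contains 0 = B.contains 0 := by
      by_cases h0 : (0 : Int) ∈ CA
      · rw [List.contains_iff_mem.mpr h0, List.contains_iff_mem.mpr ((hsame 0).mp h0)]
      · have h0' : (0 : Int) ∉ B := fun hb => h0 ((hsame 0).mpr hb)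
        simp [h0, h0']
    rw [hcont]
    by_cases h0 : B.contains 0
    · rw [if_pos h0, if_pos h0]
      exact min?_id_congr _ _ (by
        intro v
        simp only [List.mem_filter]
        exact and_congr_left' (hsame v))
    · rw [if_neg h0, if_neg h0]
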